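-- pv_equiv track=rewrite | github.com/CulinaryFrog/Projects | For Fun/Algorithms/Lamp_points.py | modified_search
-- ===== SOURCE A (Python) =====
-- def modified_search(arr, x):
--     low = 0
--     high = len(arr) - 1
--     mid = (high + low)//2
--     while low <= high:
--         if arr[mid] <= x:
--             if mid == len(arr)-1:
--                 return mid
--             elif arr[mid+1] <= x:
--                 low = mid + 1
--             else:
--                 return mid
--         else:
--             high = mid - 1
--
--         mid = (high + low)// 2
--     return -1
-- ===== SOURCE B (Python) =====
-- def modified_search(arr, x):
--     def go(low, high):
--         if low > high:
--             return -1
--         mid = (low + high) // 2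
--         if arr[mid] > x:
--             return go(low, mid - 1)
--         if mid == len(arr) - 1 or arr[mid + 1] > x:
--             return mid
--         return go(mid + 1, high)
--     return go(0, len(arr) - 1)
-- ===== Notes on version B (the rewrite author's own statement) =====
-- stated objective: alternative
-- what changed: The imperative while-loop with mutable low/high/mid state is replaced by a recursive divide-and-conquer helper over the index range, with the branch structure reorganised (guard-first: out-of-range, then the left-recursion case, then a merged boundary condition returning mid, then the right recursion).
import Mathlib
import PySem

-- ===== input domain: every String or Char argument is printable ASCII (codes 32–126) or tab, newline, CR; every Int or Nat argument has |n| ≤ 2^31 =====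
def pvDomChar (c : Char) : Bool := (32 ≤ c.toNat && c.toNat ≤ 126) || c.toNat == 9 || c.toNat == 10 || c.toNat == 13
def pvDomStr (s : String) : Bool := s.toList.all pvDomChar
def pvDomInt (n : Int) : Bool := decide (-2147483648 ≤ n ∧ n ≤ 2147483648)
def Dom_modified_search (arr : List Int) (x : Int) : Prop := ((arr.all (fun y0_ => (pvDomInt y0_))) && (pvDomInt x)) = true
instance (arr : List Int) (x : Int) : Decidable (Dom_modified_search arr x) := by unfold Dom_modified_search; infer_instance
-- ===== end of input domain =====

-- B replaces A's imperative while-loop by a recursive divide-and-conquer helper with reorganised branches (alternative decomposition, same decision path and cost).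

-- ===== PORT A =====
-- 'mid = (high + low)//2' is recomputed before each test in Python; it is inlined here.
def msLoop (arr : List Int) (x : Int) (low high : Int) : Int :=
  if h : low ≤ high then
    if PySem.List.pyGetD arr (PySem.Int.floordiv (high + low) 2) 0 ≤ x then
      if PySem.Int.floordiv (high + low) 2 = (arr.length : Int) - 1 then
        PySem.Int.floordiv (high + low) 2
      else if PySem.List.pyGetD arr (PySem.Int.floordiv (high + low) 2 + 1) 0 ≤ x then
        msLoop arr x (PySem.Int.floordiv (high + low) 2 + 1) high
      else PySem.Int.floordiv (high + low) 2
    else msLoop arr x low (PySem.Int.floordiv (high + low) 2 - 1)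
  else -1
termination_by (high + 1 - low).toNat
decreasing_by
  · have hb := PySem.Int.floordiv_two_mid_bounds h
    rw [Int.add_comm low high] at hb
    omega
  · have hb := PySem.Int.floordiv_two_mid_bounds h
    rw [Int.add_comm low high] at hb
    omega

def modified_search (arr : List Int) (x : Int) : Int :=
  msLoop arr x 0 ((arr.length : Int) - 1)

-- ===== PORT B =====
-- recursive divide-and-conquer helper; 'mid = (low + high) // 2' inlined.
def msAltGo (arr : List Int) (x : Int) (low high : Int) : Int :=
  if h : low > high then -1
  else if x < PySem.List.pyGetD arr (PySem.Int.floordiv (low + high) 2) 0 then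
    msAltGo arr x low (PySem.Int.floordiv (low + high) 2 - 1)
  else if PySem.Int.floordiv (low + high) 2 = (arr.length : Int) - 1 ∨
      x < PySem.List.pyGetD arr (PySem.Int.floordiv (low + high) 2 + 1) 0 then
    PySem.Int.floordiv (low + high) 2
  else msAltGo arr x (PySem.Int.floordiv (low + high) 2 + 1) high
termination_by (high + 1 - low).toNat
decreasing_by
  · have hb := PySem.Int.floordiv_two_mid_bounds (show low ≤ high by omega)
    omega
  · have hb := PySem.Int.floordiv_two_mid_bounds (show low ≤ high by omega)
    omega

def modified_search_alt (arr : List Int) (x : Int) : Int :=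
  msAltGo arr x 0 ((arr.length : Int) - 1)

-- ===== PRECONDITION & SPEC =====
def Spec_modified_search (arr : List Int) (x : Int) (out : Int) : Prop := out = modified_search_alt arr x
instance (arr : List Int) (x : Int) (out : Int) : Decidable (Spec_modified_search arr x out) := by unfold Spec_modified_search; infer_instance

-- ===== CLAIM (what is proved, stated in full; the proofs are below) =====
def Claim_equal_modified_search : Prop := ∀ (arr : List Int) (x : Int), Dom_modified_search arr x → Spec_modified_search arr x (modified_search arr x)

-- ===== LEMMAS AND PROOFS =====
theorem msLoop_eq_msAltGo (arr : List Int) (x : Int) :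
    ∀ low high : Int, msLoop arr x low high = msAltGo arr x low high := by
  intro low high
  fun_induction msLoop arr x low high with
  | case1 low high h h1 h2 =>
      rw [msAltGo, dif_neg (show ¬ low > high by omega)]
      simp only [Int.add_comm low high]
      rw [if_neg (show ¬ x < PySem.List.pyGetD arr (PySem.Int.floordiv (high + low) 2) 0 by omega),
        if_pos (Or.inl h2)]
  | case2 low high h h1 h2 h3 ih =>
      rw [msAltGo, dif_neg (show ¬ low > high by omega)]
      simp only [Int.add_comm low high]
      rw [if_neg (show ¬ x < PySem.List.pyGetD arr (PySem.Int.floordiv (high + low) 2) 0 by omega),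
        if_neg (show ¬ (PySem.Int.floordiv (high + low) 2 = (arr.length : Int) - 1 ∨
          x < PySem.List.pyGetD arr (PySem.Int.floordiv (high + low) 2 + 1) 0) by
            rintro (hc | hc); exact h2 hc; omega)]
      exact ih
  | case3 low high h h1 h2 h3 =>
      rw [msAltGo, dif_neg (show ¬ low > high by omega)]
      simp only [Int.add_comm low high]
      rw [if_neg (show ¬ x < PySem.List.pyGetD arr (PySem.Int.floordiv (high + low) 2) 0 by omega),
        if_pos (Or.inr (show x < PySem.List.pyGetD arr (PySem.Int.floordiv (high + low) 2 + 1) 0 by omega))]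
  | case4 low high h h1 ih =>
      rw [msAltGo, dif_neg (show ¬ low > high by omega)]
      simp only [Int.add_comm low high]
      rw [if_pos (show x < PySem.List.pyGetD arr (PySem.Int.floordiv (high + low) 2) 0 by omega)]
      exact ih
  | case5 low high h =>
      rw [msAltGo, dif_pos (show low > high by omega)]

-- ===== VERDICT (by name: the statement is the Claim_ definition above) =====
theorem modified_search_spec : Claim_equal_modified_search := by
  intro arr x _
  unfold Spec_modified_search modified_search modified_search_alt
  exact msLoop_eq_msAltGo arr x 0 ((arr.length : Int) - 1)
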